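-- pv_equiv track=rewrite | github.com/Hooriya-Muh/riscv-numeric-sim1 | src/numeric_core/bits.py | to_hex_string
-- ===== SOURCE A (Python) =====
-- NIBBLE_TO_HEX = {
--     (0,0,0,0):'0',(0,0,0,1):'1',(0,0,1,0):'2',(0,0,1,1):'3',
--     (0,1,0,0):'4',(0,1,0,1):'5',(0,1,1,0):'6',(0,1,1,1):'7',
--     (1,0,0,0):'8',(1,0,0,1):'9',(1,0,1,0):'A',(1,0,1,1):'B',
--     (1,1,0,0):'C',(1,1,0,1):'D',(1,1,1,0):'E',(1,1,1,1):'F',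
-- }
--
-- def to_hex_string(bits, group=4, prefix='0x', width_multiple=8):
--     """Pretty hex from bits using nibble lookup. Zero-pads to width_multiple nibbles (default 8=32 bits)."""
--     n = len(bits)
--     # pad to multiple of 4
--     pad = (4 - (n % 4)) % 4
--     work = [0]*pad + bits[:]
--     # group nibbles
--     hex_chars = []
--     for i in range(0, len(work), 4):
--         nib = tuple(work[i:i+4])
--         hex_chars.append(NIBBLE_TO_HEX[nib])
--     # ensure minimum width
--     if width_multiple is not None:
--         while len(hex_chars) < width_multiple:
--             hex_chars.insert(0,'0')
--     # optional underscore grouping (every 8 hex chars => 32 bits)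
--     out = ''.join(hex_chars)
--     return prefix + out
-- ===== SOURCE B (Python) =====
-- def to_hex_string(bits, group=4, prefix='0x', width_multiple=8):
--     """Fold the bits big-endian into one integer, then peel nibbles arithmetically."""
--     value = 0
--     for b in bits:
--         value = value * 2 + b
--     nibbles = max((len(bits) + 3) // 4, width_multiple if width_multiple is not None else 0)
--     digits = []
--     for _ in range(nibbles):
--         digits.append('0123456789ABCDEF'[value & 15])
--         value >>= 4
--     return prefix + ''.join(reversed(digits))
-- ===== Notes on version B (the rewrite author's own statement) =====
-- stated objective: alternative
-- what changed: B folds the bit list big-endian into a single integer and peels hex digits arithmetically (value % 16, value // 16) for max(ceil(n/4), width_multiple or 0) nibbles, replacing A's nibble-tuple dictionary lookup over 4-bit slices and its insert(0) zero-padding loop.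
import Mathlib
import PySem

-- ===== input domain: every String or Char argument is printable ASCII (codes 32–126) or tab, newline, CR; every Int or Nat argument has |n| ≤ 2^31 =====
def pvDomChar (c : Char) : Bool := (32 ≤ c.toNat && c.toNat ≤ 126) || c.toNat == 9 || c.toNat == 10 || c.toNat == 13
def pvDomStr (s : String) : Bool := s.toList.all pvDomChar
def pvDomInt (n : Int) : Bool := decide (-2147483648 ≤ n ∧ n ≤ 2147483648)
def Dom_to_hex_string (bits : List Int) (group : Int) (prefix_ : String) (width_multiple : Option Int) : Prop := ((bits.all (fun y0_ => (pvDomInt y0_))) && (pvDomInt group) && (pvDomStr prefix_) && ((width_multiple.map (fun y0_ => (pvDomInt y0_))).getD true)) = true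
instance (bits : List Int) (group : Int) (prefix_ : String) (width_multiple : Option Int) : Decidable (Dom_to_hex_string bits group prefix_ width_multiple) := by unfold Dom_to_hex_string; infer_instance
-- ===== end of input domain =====

-- B replaces A's nibble-tuple table lookup and insert(0) padding loop by folding the
-- bits into one integer and peeling hex digits arithmetically (objective: alternative).

-- ===== PORT A =====
-- the module-level NIBBLE_TO_HEX dict (tuple keys become 4-element lists)
def nibbleToHex : PySem.Dict (List Int) String := PySem.Dict.ofList [
  ([0,0,0,0],"0"),([0,0,0,1],"1"),([0,0,1,0],"2"),([0,0,1,1],"3"),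
  ([0,1,0,0],"4"),([0,1,0,1],"5"),([0,1,1,0],"6"),([0,1,1,1],"7"),
  ([1,0,0,0],"8"),([1,0,0,1],"9"),([1,0,1,0],"A"),([1,0,1,1],"B"),
  ([1,1,0,0],"C"),([1,1,0,1],"D"),([1,1,1,0],"E"),([1,1,1,1],"F")]

-- 'while len(hex_chars) < width_multiple: hex_chars.insert(0,'0')'
def padLoop (w : Int) (l : List String) : List String :=
  if (l.length : Int) < w then padLoop w ("0" :: l) else l
termination_by (w - l.length).toNat
decreasing_by simp only [List.length_cons]; omega

def to_hex_string (bits : List Int) (group : Int) (prefix_ : String) (width_multiple : Option Int) : String :=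
  let n : Int := bits.length
  let pad := PySem.Int.mod (4 - PySem.Int.mod n 4) 4
  let work := List.replicate pad.toNat (0 : Int) ++ bits
  -- for i in range(0, len(work), 4): hex_chars.append(NIBBLE_TO_HEX[work[i:i+4]])
  -- (a failed dict lookup is Python's KeyError: Option-threaded, none excluded by Pre_)
  let hex_chars? := (PySem.List.pyRange 0 (work.length : Int) 4).foldl
      (fun (acc : Option (List String)) i =>
        match acc with
        | none => none
        | some l =>
          match nibbleToHex.get? (PySem.List.slice work (some i) (some (i + 4))) with
          | none => none
          | some c => some (l ++ [c])) (some [])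
  match hex_chars? with
  | none => ""   -- KeyError (some bit not 0/1); outside Pre_
  | some hcs =>
    let hcs' := match width_multiple with
      | none => hcs
      | some w => padLoop w hcs
    prefix_ ++ PySem.Str.join "" hcs'

-- ===== PORT B =====
-- '0123456789ABCDEF'[value & 15]  (for ints, value & 15 = value % 16 — exact);
-- the index is always in range, so the lookup never misses.
def hexDigit (v : Int) : String :=
  match PySem.Str.pyGet? "0123456789ABCDEF" (PySem.Int.mod v 16) with
  | some c => String.ofList [c]
  | none => ""

def to_hex_string_alt (bits : List Int) (group : Int) (prefix_ : String) (width_multiple : Option Int) : String :=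
  let value := bits.foldl (fun v b => v * 2 + b) 0
  let nibbles := max (PySem.Int.floordiv ((bits.length : Int) + 3) 4)
                     (match width_multiple with | none => 0 | some w => w)
  -- for _ in range(nibbles): digits.append(…[value & 15]); value >>= 4
  -- (value >> 4 = value // 16 on ints — exact)
  let st := (List.range nibbles.toNat).foldl
      (fun (p : List String × Int) _ =>
        (p.1 ++ [hexDigit p.2], PySem.Int.floordiv p.2 16)) ([], value)
  prefix_ ++ PySem.Str.join "" st.1.reverse

-- ===== PRECONDITION & SPEC =====
-- Pre_ excludes exactly the inputs on which A raises KeyError: a bit that is not 0 or 1.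
def Pre_to_hex_string (bits : List Int) (group : Int) (prefix_ : String) (width_multiple : Option Int) : Prop :=
  ∀ b ∈ bits, b = 0 ∨ b = 1
instance (bits : List Int) (group : Int) (prefix_ : String) (width_multiple : Option Int) : Decidable (Pre_to_hex_string bits group prefix_ width_multiple) := by unfold Pre_to_hex_string; infer_instance

def pvWitness_to_hex_string : List Int × Int × String × Option Int := ([1,0,1,1,0], 4, "0x", some 8)

def Spec_to_hex_string (bits : List Int) (group : Int) (prefix_ : String) (width_multiple : Option Int) (out : String) : Prop := out = to_hex_string_alt bits group prefix_ width_multiple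
instance (bits : List Int) (group : Int) (prefix_ : String) (width_multiple : Option Int) (out : String) : Decidable (Spec_to_hex_string bits group prefix_ width_multiple out) := by unfold Spec_to_hex_string; infer_instance

-- ===== CLAIM (what is proved, stated in full; the proofs are below) =====
def Claim_equal_to_hex_string : Prop := ∀ (bits : List Int) (group : Int) (prefix_ : String) (width_multiple : Option Int), Dom_to_hex_string bits group prefix_ width_multiple → Pre_to_hex_string bits group prefix_ width_multiple → Spec_to_hex_string bits group prefix_ width_multiple (to_hex_string bits group prefix_ width_multiple)

-- ===== LEMMAS AND PROOFS =====

-- the big-endian value of a bit list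
def bitVal (l : List Int) : Int := l.foldl (fun v b => v * 2 + b) 0

-- the low-to-high hex digits B's loop produces
def lowDigits : Nat → Int → List String
  | 0, _ => []
  | m + 1, v => hexDigit v :: lowDigits m (PySem.Int.floordiv v 16)

theorem bitVal_from (l : List Int) (a : Int) :
    l.foldl (fun v b => v * 2 + b) a = a * 2 ^ l.length + bitVal l := by
  induction l generalizing a with
  | nil => simp [bitVal]
  | cons x xs ih =>
    simp only [List.foldl_cons, List.length_cons, bitVal]
    rw [ih, ih (0 * 2 + x)]
    ring
theorem bitVal_append (xs ys : List Int) :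
    bitVal (xs ++ ys) = bitVal xs * 2 ^ ys.length + bitVal ys := by
  simp only [bitVal, List.foldl_append]
  exact bitVal_from ys _
theorem bitVal_nonneg (l : List Int) (h : ∀ b ∈ l, b = 0 ∨ b = 1) : 0 ≤ bitVal l := by
  induction l with
  | nil => simp [bitVal]
  | cons x xs ih =>
    have hx := h x (by simp)
    have hxs := ih (fun b hb => h b (by simp [hb]))
    have := bitVal_from xs (0 * 2 + x)
    simp only [bitVal, List.foldl_cons] at *
    rw [this]
    have : (0:Int) ≤ 2 ^ xs.length := by positivity
    rcases hx with h|h <;> subst h <;> nlinarith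
theorem bitVal_lt (l : List Int) (h : ∀ b ∈ l, b = 0 ∨ b = 1) : bitVal l < 2 ^ l.length := by
  induction l with
  | nil => simp [bitVal]
  | cons x xs ih =>
    have hx := h x (by simp)
    have hxs := ih (fun b hb => h b (by simp [hb]))
    have heq := bitVal_from xs (0 * 2 + x)
    simp only [bitVal, List.foldl_cons, List.length_cons] at *
    rw [heq, pow_succ]
    have : (0:Int) ≤ 2 ^ xs.length := by positivity
    rcases hx with h|h <;> subst h <;> nlinarith

theorem lowDigits_length (m : Nat) (v : Int) : (lowDigits m v).length = m := by
  induction m generalizing v with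
  | zero => rfl
  | succ m ih => simp [lowDigits, ih]

theorem bitVal_replicate_zero (p : Nat) : bitVal (List.replicate p 0) = 0 := by
  induction p with
  | zero => rfl
  | succ p ih =>
    simpa [bitVal, List.replicate_succ, List.foldl_cons] using ih

theorem lowDigits_zero (m : Nat) : lowDigits m 0 = List.replicate m "0" := by
  induction m with
  | zero => rfl
  | succ m ih => simp [lowDigits, ih, List.replicate_succ]; decide
theorem lowDigits_pad (k m : Nat) (v : Int) (hk : k ≤ m) (h0 : 0 ≤ v) (hv : v < 16 ^ k) :
    lowDigits m v = lowDigits k v ++ List.replicate (m - k) "0" := by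
  induction k generalizing v m with
  | zero =>
    simp only [pow_zero] at hv
    have : v = 0 := by omega
    subst this
    simp [lowDigits, lowDigits_zero]
  | succ k ih =>
    obtain ⟨m', rfl⟩ : ∃ m', m = m' + 1 := ⟨m - 1, by omega⟩
    have hd : PySem.Int.floordiv v 16 = v / 16 := by
      rw [PySem.Int.floordiv_eq_ediv_of_pos]; norm_num
    have hv' : v < 16 ^ k * 16 := by rw [← pow_succ]; exact hv
    have h1 : 0 ≤ v / 16 := by omega
    have h2 : v / 16 < 16 ^ k := by omega
    simp only [lowDigits, List.cons_append, hd]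
    have hrep : m' + 1 - (k + 1) = m' - k := by omega
    rw [ih m' (v / 16) (by omega) h1 h2, ← hd, hrep]

theorem padLoop_eq (w : Int) (l : List String) :
    padLoop w l = List.replicate (w - l.length).toNat "0" ++ l := by
  generalize hn : (w - l.length).toNat = n
  induction n generalizing l with
  | zero =>
    rw [padLoop, if_neg (by omega)]
    simp
  | succ n ih =>
    rw [padLoop, if_pos (by omega)]
    rw [ih ("0" :: l) (by simp; omega)]
    simp [List.replicate_succ']

theorem B_loop (m : Nat) (acc : List String) (v : Int) :
    (List.range m).foldl
      (fun (p : List String × Int) _ => (p.1 ++ [hexDigit p.2], PySem.Int.floordiv p.2 16)) (acc, v)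
    = (acc ++ lowDigits m v, (fun x => PySem.Int.floordiv x 16)^[m] v) := by
  induction m generalizing acc v with
  | zero => simp [lowDigits]
  | succ m ih =>
    rw [List.range_succ_eq_map]
    simp only [List.foldl_cons, List.foldl_map]
    rw [ih]
    simp [lowDigits, Function.iterate_succ_apply]

theorem nib_lookup (nib : List Int) (hlen : nib.length = 4) (hb : ∀ b ∈ nib, b = 0 ∨ b = 1) :
    nibbleToHex.get? nib = some (hexDigit (bitVal nib)) := by
  rcases nib with _|⟨a,_|⟨b,_|⟨c,_|⟨d,_|e⟩⟩⟩⟩ <;> simp at hlen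
  have ha := hb a (by simp)
  have hbb := hb b (by simp)
  have hc := hb c (by simp)
  have hd := hb d (by simp)
  rcases ha with rfl|rfl <;> rcases hbb with rfl|rfl <;> rcases hc with rfl|rfl <;>
    rcases hd with rfl|rfl <;> decide

theorem A_chars (k : Nat) (w : List Int) (hlen : w.length = 4 * k)
    (hb : ∀ b ∈ w, b = 0 ∨ b = 1) (acc : List String) :
    ((List.range k).map (fun j => ((4 * j : Nat) : Int))).foldl
      (fun (acc : Option (List String)) i =>
        match acc with
        | none => none
        | some l =>
          match nibbleToHex.get? (PySem.List.slice w (some i) (some (i + 4))) with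
          | none => none
          | some c => some (l ++ [c])) (some acc)
    = some (acc ++ (lowDigits k (bitVal w)).reverse) := by
  induction k generalizing w acc with
  | zero =>
    have : w = [] := List.eq_nil_of_length_eq_zero (by omega)
    subst this
    simp [lowDigits]
  | succ k ih =>
    set front := w.take (4 * k) with hfront
    set nib := w.drop (4 * k) with hnib
    have hw : w = front ++ nib := (List.take_append_drop _ w).symm
    have hfl : front.length = 4 * k := by simp [hfront]; omega
    have hnl : nib.length = 4 := by simp [hnib]; omega
    have hbf : ∀ b ∈ front, b = 0 ∨ b = 1 := fun b h => hb b (hw ▸ List.mem_append_left _ h)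
    have hbn : ∀ b ∈ nib, b = 0 ∨ b = 1 := fun b h => hb b (hw ▸ List.mem_append_right _ h)
    rw [List.range_succ, List.map_append, List.foldl_append]
    -- inner foldl over the first k indices only touches `front`
    have hcongr :
        ((List.range k).map (fun j => ((4 * j : Nat) : Int))).foldl
          (fun (acc : Option (List String)) i =>
            match acc with
            | none => none
            | some l =>
              match nibbleToHex.get? (PySem.List.slice w (some i) (some (i + 4))) with
              | none => none
              | some c => some (l ++ [c])) (some acc)
        = ((List.range k).map (fun j => ((4 * j : Nat) : Int))).foldl
          (fun (acc : Option (List String)) i =>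
            match acc with
            | none => none
            | some l =>
              match nibbleToHex.get? (PySem.List.slice front (some i) (some (i + 4))) with
              | none => none
              | some c => some (l ++ [c])) (some acc) := by
      apply PySem.List.foldl_congr_mem
      intro a x hx
      simp only [List.mem_map, List.mem_range] at hx
      obtain ⟨j, hj, rfl⟩ := hx
      have hsl : PySem.List.slice w (some ((4 * j : Nat) : Int)) (some (((4 * j : Nat) : Int) + 4))
          = PySem.List.slice front (some ((4 * j : Nat) : Int)) (some (((4 * j : Nat) : Int) + 4)) := by
        have e2 : (((4 * j : Nat) : Int) + 4) = (((4 * j : Nat) : Int) + ((4:Nat) : Int)) := by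
          norm_num
        rw [e2, PySem.List.slice_natCast_add, PySem.List.slice_natCast_add]
        conv_lhs => rw [hw]
        rw [List.drop_append_of_le_length (by omega)]
        rw [List.take_append_of_le_length (by simp [hfl]; omega)]
      rw [hsl]
    rw [hcongr, ih front hfl hbf acc]
    -- the last index: the final nibble
    have hslast : PySem.List.slice w (some ((4 * k : Nat) : Int)) (some (((4 * k : Nat) : Int) + 4)) = nib := by
      have e2 : (((4 * k : Nat) : Int) + 4) = (((4 * k : Nat) : Int) + ((4:Nat) : Int)) := by
        norm_num
      rw [e2, PySem.List.slice_natCast_add, ← hnib]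
      exact List.take_of_length_le (by omega)
    -- value decomposition
    have hval : bitVal w = bitVal front * 16 + bitVal nib := by
      rw [hw, bitVal_append, hnl]; norm_num
    have hn0 : 0 ≤ bitVal nib := bitVal_nonneg nib hbn
    have hn16 : bitVal nib < 16 := by
      have := bitVal_lt nib hbn
      rw [hnl] at this; norm_num at this; exact this
    have hmod : PySem.Int.mod (bitVal w) 16 = PySem.Int.mod (bitVal nib) 16 := by
      rw [PySem.Int.mod_eq_emod_of_pos (by norm_num), PySem.Int.mod_eq_emod_of_pos (by norm_num),
        hval]
      omega
    have hdiv : PySem.Int.floordiv (bitVal w) 16 = bitVal front := by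
      rw [PySem.Int.floordiv_eq_ediv_of_pos (by norm_num), hval]
      omega
    have hld : lowDigits (k + 1) (bitVal w)
        = hexDigit (bitVal nib) :: lowDigits k (bitVal front) := by
      simp only [lowDigits, hdiv, hexDigit, hmod]
    simp only [List.map_cons, List.map_nil, List.foldl_cons, List.foldl_nil, hslast,
      nib_lookup nib hnl hbn, hld, List.reverse_cons]
    simp

theorem main_eval (bits : List Int) (group : Int) (prefix_ : String)
    (wm : Option Int) (hpre : ∀ b ∈ bits, b = 0 ∨ b = 1) :
    to_hex_string bits group prefix_ wm = to_hex_string_alt bits group prefix_ wm := by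
  have hl : ∃ k : Nat, k = (bits.length + 3) / 4 := ⟨_, rfl⟩
  obtain ⟨k, hk⟩ := hl
  set l := bits.length with hldef
  set p := (PySem.Int.mod (4 - PySem.Int.mod (l : Int) 4) 4).toNat with hp
  have hplen : p + l = 4 * k := by
    rw [hp, PySem.Int.mod_eq_emod_of_pos (by norm_num), PySem.Int.mod_eq_emod_of_pos (by norm_num)]
    omega
  set work := List.replicate p (0 : Int) ++ bits with hwork
  have hwlen : work.length = 4 * k := by simp [hwork]; omega
  have hbw : ∀ b ∈ work, b = 0 ∨ b = 1 := by
    intro b hb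
    rcases List.mem_append.mp hb with h | h
    · exact Or.inl (List.eq_of_mem_replicate h)
    · exact hpre b h
  set V := bitVal bits with hV
  have hwv : bitVal work = V := by
    rw [hwork, bitVal_append, bitVal_replicate_zero]; ring
  have hV0 : 0 ≤ V := bitVal_nonneg bits hpre
  have hVk : V < 16 ^ k := by
    have h1 : V < 2 ^ l := bitVal_lt bits hpre
    have h2 : (2 : Int) ^ l ≤ 2 ^ (4 * k) := by
      apply pow_le_pow_right₀ (by norm_num)
      omega
    have h3 : (16 : Int) ^ k = 2 ^ (4 * k) := by
      rw [show (16 : Int) = 2 ^ 4 from by norm_num, ← pow_mul]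
    omega
  have hrange : PySem.List.pyRange 0 ((work.length : Int)) 4
      = (List.range k).map (fun j => ((4 * j : Nat) : Int)) := by
    rw [PySem.List.pyRange_of_pos 0 ((work.length : Int)) (by norm_num), hwlen]
    rcases Nat.eq_zero_or_pos k with h0 | hpos
    · simp [h0]
    · rw [if_pos (by exact_mod_cast Nat.mul_pos (by norm_num) hpos)]
      have hcnt : (((4 * k : Nat) : Int) - 0 + 4 - 1) / 4 = (k : Int) := by omega
      rw [hcnt, Int.toNat_natCast]
      apply List.map_congr_left
      intro j _
      push_cast
      ring
  have hflo : PySem.Int.floordiv ((l : Int) + 3) 4 = (k : Int) := by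
    have h := PySem.Int.floordiv_natCast (l + 3) 4
    rw [hk]
    exact_mod_cast h
  -- evaluate A
  simp only [to_hex_string, to_hex_string_alt]
  rw [hrange, A_chars k work hwlen hbw [], hwv]
  rw [hflo, B_loop]
  simp only [List.nil_append]
  have hfold : List.foldl (fun v b => v * 2 + b) (0 : Int) bits = V := hV.symm
  rw [hfold]
  -- case split on width_multiple
  cases wm with
  | none =>
    have hm : (max (k : Int)
        (match (none : Option Int) with | none => 0 | some w => w)).toNat = k := by
      simp
    rw [hm]
  | some wv =>
    have hm : (max (k : Int)
        (match (some wv : Option Int) with | none => 0 | some w => w)).toNat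
        = k + (wv - (k : Int)).toNat := by
      simp; omega
    rw [hm]
    show prefix_ ++ PySem.Str.join "" (padLoop wv (lowDigits k V).reverse)
        = prefix_ ++ PySem.Str.join "" (lowDigits (k + (wv - (k : Int)).toNat) V).reverse
    rw [padLoop_eq, lowDigits_pad k (k + (wv - (k : Int)).toNat) V (by omega) hV0 hVk,
      List.reverse_append, List.reverse_replicate]
    congr 2
    simp [lowDigits_length]

-- ===== VERDICT (by name: the statement is the Claim_ definition above) =====
theorem to_hex_string_spec : Claim_equal_to_hex_string := by
  intro bits group prefix_ wm _ hpre
  unfold Spec_to_hex_string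
  exact main_eval bits group prefix_ wm hpre
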